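-- pv_equiv track=rewrite | github.com/VAibhav1031/PYTHON | valid_cardnum.py | iscars_number
-- ===== SOURCE A (Python) =====
-- def iscars_number(card_number):
--     card_number=card_number.replace('-','')
--
--     if len(card_number)== 16 and card_number[0] in "456":
--         if card_number.isdigit():
--             for i in range(len(card_number)-3):
--                 if card_number[i]==card_number[i+1]==card_number[i+2]==card_number[i+3]:
--                     return False
--
--             return True
--
--     return False
-- ===== SOURCE B (Python) =====
-- def iscars_number(card_number):
--     s = card_number.replace('-', '')
--     if len(s) != 16 or s[0] not in "456" or not s.isdigit():
--         return False
--     run = 1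
--     for prev, cur in zip(s, s[1:]):
--         run = run + 1 if cur == prev else 1
--         if run == 4:
--             return False
--     return True
-- ===== Notes on version B (the rewrite author's own statement) =====
-- stated objective: alternative
-- what changed: The quadratic-feeling 4-window scan (comparing s[i..i+3] for every i) is replaced by a single run-length counter over adjacent pairs that flags any run of 4 equal digits, with the format guards collapsed into one early-return condition.
import Mathlib
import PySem

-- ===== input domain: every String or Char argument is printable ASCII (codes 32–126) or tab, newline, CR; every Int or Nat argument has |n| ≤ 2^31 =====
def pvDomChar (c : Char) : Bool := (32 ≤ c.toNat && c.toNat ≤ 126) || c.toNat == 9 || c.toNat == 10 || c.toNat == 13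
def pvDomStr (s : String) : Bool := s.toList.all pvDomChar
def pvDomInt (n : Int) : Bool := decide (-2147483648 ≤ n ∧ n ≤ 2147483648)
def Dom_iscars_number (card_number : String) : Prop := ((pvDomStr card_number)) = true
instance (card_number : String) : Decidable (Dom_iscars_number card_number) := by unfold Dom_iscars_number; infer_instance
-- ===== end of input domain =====

-- B replaces A's 4-window scan (3 indexed comparisons per position) by a single run-length
-- counter over adjacent pairs, and collapses the nested format guards into one early return.

-- ===== PORT A =====

-- card_number[0] in "456" (A only evaluates this after len == 16, so the index is in range; none is unreachable)
def pvFirstIn456 (cs : List Char) : Bool :=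
  match PySem.List.pyGet? cs 0 with
  | some c => PySem.Chars.isIn [c] ['4', '5', '6']
  | none => false

-- card_number[i]==card_number[i+1]==card_number[i+2]==card_number[i+3] (indices in range inside the loop)
def pvQuadAt (cs : List Char) (i : Int) : Bool :=
  PySem.List.pyGet? cs i == PySem.List.pyGet? cs (i + 1)
    && PySem.List.pyGet? cs (i + 1) == PySem.List.pyGet? cs (i + 2)
    && PySem.List.pyGet? cs (i + 2) == PySem.List.pyGet? cs (i + 3)

-- for i in range(len(card_number)-3): if <quad>: return False;  then: return True
def pvLoopA (cs : List Char) : List Int → Bool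
  | [] => true
  | i :: rest => if pvQuadAt cs i then false else pvLoopA cs rest

def iscars_number (card_number : String) : Bool :=
  let cs := PySem.Chars.replace card_number.toList ['-'] []
  if PySem.Chars.len cs == 16 && pvFirstIn456 cs then
    if PySem.Chars.strIsdigit cs then
      pvLoopA cs (PySem.List.pyRange 0 ((PySem.Chars.len cs : Int) - 3) 1)
    else false
  else false

-- ===== PORT B =====

-- for prev, cur in zip(s, s[1:]): run = run + 1 if cur == prev else 1; if run == 4: return False
def pvRunLoop : Char → Nat → List Char → Bool
  | _, _, [] => true
  | prev, run, cur :: rest =>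
      let run' := if cur == prev then run + 1 else 1
      if run' == 4 then false else pvRunLoop cur run' rest

def iscars_number_alt (card_number : String) : Bool :=
  let cs := PySem.Chars.replace card_number.toList ['-'] []
  if !(PySem.Chars.len cs == 16) || !pvFirstIn456 cs || !PySem.Chars.strIsdigit cs then
    false
  else
    match cs with
    | [] => true                       -- zip over the empty string: the loop body never runs
    | c0 :: rest => pvRunLoop c0 1 rest

-- ===== PRECONDITION & SPEC =====
def Spec_iscars_number (card_number : String) (out : Bool) : Prop := out = iscars_number_alt card_number
instance (card_number : String) (out : Bool) : Decidable (Spec_iscars_number card_number out) := by unfold Spec_iscars_number; infer_instance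

-- ===== CLAIM (what is proved, stated in full; the proofs are below) =====
def Claim_equal_iscars_number : Prop := ∀ (card_number : String), Dom_iscars_number card_number → Spec_iscars_number card_number (iscars_number card_number)

-- ===== LEMMAS AND PROOFS =====

-- "the list has four consecutive equal characters", recursed on the list structure
def pvHasQuad : List Char → Bool
  | a :: b :: c :: d :: t => (a == b && b == c && c == d) || pvHasQuad (b :: c :: d :: t)
  | _ => false

-- length of the maximal prefix consisting of copies of c
def pvLeadRun (c : Char) : List Char → Nat
  | [] => 0
  | x :: t => if x == c then pvLeadRun c t + 1 else 0

theorem pvLoopA_eq_any (cs : List Char) (l : List Int) :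
    pvLoopA cs l = !(l.any (pvQuadAt cs)) := by
  induction l with
  | nil => rfl
  | cons i rest ih =>
      cases h : pvQuadAt cs i <;> simp [pvLoopA, List.any_cons, h, ih]

theorem pvHasQuad_cons (a : Char) (rest : List Char) :
    pvHasQuad (a :: rest) = (decide (3 ≤ pvLeadRun a rest) || pvHasQuad rest) := by
  match rest with
  | [] => simp [pvHasQuad, pvLeadRun]
  | [b] => by_cases h : b = a <;> simp [pvHasQuad, pvLeadRun, h]
  | [b, c] =>
      by_cases h1 : b = a <;> by_cases h2 : c = a <;>
        simp [pvHasQuad, pvLeadRun, h1, h2]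
  | b :: c :: d :: t =>
      simp only [pvHasQuad, pvLeadRun]
      by_cases h1 : b = a <;> by_cases h2 : c = b <;> by_cases h3 : d = c <;>
        simp_all <;> (intros; subst_vars; simp_all)

theorem pvRunLoop_eq (cs : List Char) : ∀ (prev : Char) (run : Nat), 1 ≤ run → run ≤ 3 →
    pvRunLoop prev run cs = !(decide (4 ≤ run + pvLeadRun prev cs) || pvHasQuad cs) := by
  induction cs with
  | nil => intro prev run h1 h3; simp [pvRunLoop, pvLeadRun, pvHasQuad]; omega
  | cons c rest ih =>
      intro prev run h1 h3
      by_cases hc : c = prev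
      · subst hc
        by_cases h4 : run + 1 = 4
        · simp [pvRunLoop, h4, pvLeadRun]; omega
        · have h4' : ((run + 1 == 4) = false) := by simpa using h4
          simp only [pvRunLoop, beq_self_eq_true, if_true, h4', Bool.false_eq_true, if_false,
            ih c (run + 1) (by omega) (by omega), pvHasQuad_cons, pvLeadRun]
          by_cases hL : 3 ≤ pvLeadRun c rest
          · simp [hL, show 4 ≤ run + 1 + pvLeadRun c rest from by omega,
              show 4 ≤ run + (pvLeadRun c rest + 1) from by omega]
          · simp [hL, show (run + 1 + pvLeadRun c rest) = run + (pvLeadRun c rest + 1) from by omega]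
      · have hb : (c == prev) = false := by simpa using hc
        simp only [pvRunLoop, hb, Bool.false_eq_true, if_false,
          show ((1 : Nat) == 4) = false from by decide,
          ih c 1 (by omega) (by omega), pvHasQuad_cons, pvLeadRun]
        simp [show ∀ L : Nat, (4 ≤ 1 + L) ↔ (3 ≤ L) from by omega]
        omega

theorem pvQuadAt_nat (cs : List Char) (k : Nat) :
    pvQuadAt cs (k : Int)
      = (cs[k]? == cs[k + 1]? && (cs[k + 1]? == cs[k + 2]? && cs[k + 2]? == cs[k + 3]?)) := by
  simp only [pvQuadAt]
  rw [show (k : Int) + 1 = ((k + 1 : Nat) : Int) by push_cast; ring]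
  rw [show (k : Int) + 2 = ((k + 2 : Nat) : Int) by push_cast; ring]
  rw [show (k : Int) + 3 = ((k + 3 : Nat) : Int) by push_cast; ring]
  simp only [PySem.List.pyGet?_natCast, Bool.and_assoc]

theorem pvAnyRange_eq_hasQuad (cs : List Char) :
    ((List.range (cs.length - 3)).any (fun k : Nat => pvQuadAt cs (k : Int))) = pvHasQuad cs := by
  induction cs with
  | nil => rfl
  | cons a rest ih =>
      rcases rest with _ | ⟨b, _ | ⟨c, _ | ⟨d, t⟩⟩⟩
      · rfl
      · rfl
      · rfl
      · have hlen : (a :: b :: c :: d :: t).length - 3 = (b :: c :: d :: t).length - 3 + 1 := by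
          simp
        rw [hlen, List.range_succ_eq_map, List.any_cons, List.any_map]
        have hshift : ((fun k : Nat => pvQuadAt (a :: b :: c :: d :: t) (k : Int)) ∘ Nat.succ)
            = fun k : Nat => pvQuadAt (b :: c :: d :: t) (k : Int) := by
          funext k
          simp only [Function.comp, Nat.succ_eq_add_one]
          rw [pvQuadAt_nat, pvQuadAt_nat]
          simp
        have h0 : pvQuadAt (a :: b :: c :: d :: t) ((0 : Nat) : Int)
            = (a == b && b == c && c == d) := by
          rw [pvQuadAt_nat]; simp [Bool.and_assoc]
        rw [hshift, ih, h0]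
        rfl

theorem pvLoopA_range (cs : List Char) :
    pvLoopA cs (PySem.List.pyRange 0 ((PySem.Chars.len cs : Int) - 3) 1) = !pvHasQuad cs := by
  rw [pvLoopA_eq_any, PySem.List.pyRange_one]
  have ht : (((PySem.Chars.len cs : Int) - 3) - 0).toNat = cs.length - 3 := by
    simp [PySem.Chars.len_eq]; omega
  rw [ht, List.any_map]
  have hcomp : ((pvQuadAt cs) ∘ fun k : Nat => (0 : Int) + k)
      = fun k : Nat => pvQuadAt cs (k : Int) := by
    funext k; simp [Function.comp]
  rw [hcomp, pvAnyRange_eq_hasQuad]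

theorem pvRunLoop_hasQuad (c0 : Char) (rest : List Char) :
    pvRunLoop c0 1 rest = !pvHasQuad (c0 :: rest) := by
  rw [pvRunLoop_eq rest c0 1 (by omega) (by omega), pvHasQuad_cons]
  simp [show ∀ L : Nat, (4 ≤ 1 + L) ↔ (3 ≤ L) from by omega]

theorem pvKey (cs : List Char) :
    pvLoopA cs (PySem.List.pyRange 0 ((PySem.Chars.len cs : Int) - 3) 1)
      = (match cs with
         | [] => true
         | c0 :: rest => pvRunLoop c0 1 rest) := by
  rw [pvLoopA_range]
  cases cs with
  | nil => rfl
  | cons c0 rest => exact (pvRunLoop_hasQuad c0 rest).symm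

-- ===== VERDICT (by name: the statement is the Claim_ definition above) =====
theorem iscars_number_spec : Claim_equal_iscars_number := by
  intro s _
  unfold Spec_iscars_number iscars_number iscars_number_alt
  by_cases h1 : (PySem.Chars.len (PySem.Chars.replace s.toList ['-'] []) == 16) = true <;>
    by_cases h2 : pvFirstIn456 (PySem.Chars.replace s.toList ['-'] []) = true <;>
    by_cases h3 : PySem.Chars.strIsdigit (PySem.Chars.replace s.toList ['-'] []) = true <;>
    simp only [h1, h2, h3, Bool.not_eq_true] at * <;>
    simp
  exact pvKey _
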